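-- pv_equiv track=rewrite | github.com/kikimonsterAF/JamShed.AI | server/app/main.py | _infer_form_from_chords
-- ===== SOURCE A (Python) =====
-- from typing import List, Optional, Tuple
--
-- def _infer_form_from_chords(beat_chords: List[str], phrase_len: int = 4) -> List[str]:
--     """Form labeling: hash phrases of length phrase_len and assign A/B/C by first occurrence."""
--     labels: List[str] = []
--     seen = {}
--     next_label_ord = ord("A")
--     for i in range(0, len(beat_chords), phrase_len):
--         phrase = tuple(beat_chords[i : i + phrase_len])
--         if phrase not in seen:
--             seen[phrase] = chr(next_label_ord)
--             next_label_ord += 1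
--         labels.append(seen[phrase])
--     return labels
-- ===== SOURCE B (Python) =====
-- from typing import List
--
--
-- def _infer_form_from_chords(beat_chords: List[str], phrase_len: int = 4) -> List[str]:
--     """Dict-free labeling via index arithmetic: each phrase's label is ord('A') plus the
--     number of first-occurrence positions strictly before its own first occurrence."""
--     phrases = [tuple(beat_chords[i : i + phrase_len]) for i in range(0, len(beat_chords), phrase_len)]
--     firsts = [phrases.index(p) for p in phrases]
--     return [chr(ord("A") + sum(1 for i in range(f) if firsts[i] == i)) for f in firsts]
-- ===== Notes on version B (the rewrite author's own statement) =====
-- stated objective: alternative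
-- what changed: Removes the hash map entirely: instead of A's stateful dict-plus-counter pass, B computes each phrase's first-occurrence index with list.index and derives the label arithmetically as ord('A') plus the count of first-occurrence positions strictly before it; it trades A's O(n) dict pass for dict-free index arithmetic that is quadratic in the number of phrases.
import Mathlib
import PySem

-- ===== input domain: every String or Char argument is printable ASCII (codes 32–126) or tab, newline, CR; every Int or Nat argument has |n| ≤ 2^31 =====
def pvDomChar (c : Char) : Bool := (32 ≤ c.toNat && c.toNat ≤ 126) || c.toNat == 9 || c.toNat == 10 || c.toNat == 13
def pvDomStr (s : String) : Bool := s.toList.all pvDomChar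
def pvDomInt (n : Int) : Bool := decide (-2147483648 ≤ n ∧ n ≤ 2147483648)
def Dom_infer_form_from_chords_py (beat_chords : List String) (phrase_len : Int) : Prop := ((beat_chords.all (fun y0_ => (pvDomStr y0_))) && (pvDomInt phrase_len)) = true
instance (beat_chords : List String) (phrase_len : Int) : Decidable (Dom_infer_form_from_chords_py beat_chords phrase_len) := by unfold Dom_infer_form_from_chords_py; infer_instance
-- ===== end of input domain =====

-- B removes A's dict-plus-counter pass: it labels each phrase arithmetically from
-- first-occurrence indices (objective: alternative; return values proved equal).

-- chr(n) for the label characters (exact for the code points this function produces)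
def pvChr (n : Int) : String := String.ofList [Char.ofNat n.toNat]

-- ===== PORT A =====
-- the body of A's for-loop, acting on state (labels, seen, next_label_ord) and the current phrase
def pvLabelStep (st : List String × PySem.Dict (List String) String × Int) (phrase : List String) :
    List String × PySem.Dict (List String) String × Int :=
  match st.2.1.get? phrase with
  | some v => (st.1 ++ [v], st.2.1, st.2.2)
  | none => (st.1 ++ [pvChr st.2.2], st.2.1.insert phrase (pvChr st.2.2), st.2.2 + 1)

def infer_form_from_chords_py (beat_chords : List String) (phrase_len : Int) : List String :=
  ((PySem.List.pyRange 0 (PySem.List.len beat_chords) phrase_len).foldl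
      (fun st i => pvLabelStep st (PySem.List.slice beat_chords (some i) (some (i + phrase_len))))
      ([], PySem.Dict.empty, 65)).1

-- ===== PORT B =====
-- B-side helper: the phrase list built in one comprehension
def pvPhrases (beat_chords : List String) (phrase_len : Int) : List (List String) :=
  (PySem.List.pyRange 0 (PySem.List.len beat_chords) phrase_len).map
    (fun i => PySem.List.slice beat_chords (some i) (some (i + phrase_len)))

-- phrases.index(p) for each p (always found since p is drawn from phrases; exact there)
def pvFirsts (phrases : List (List String)) : List Nat :=
  phrases.map (fun p => (PySem.List.index? phrases p).getD 0)

-- sum(1 for i in range(f) if firsts[i] == i)  (indices i < f are always in range)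
def pvCountPrevFirsts (firsts : List Nat) (f : Nat) : Nat :=
  (List.range f).foldl (fun acc i => acc + (if firsts.getD i 0 = i then 1 else 0)) 0

def infer_form_from_chords_py_alt (beat_chords : List String) (phrase_len : Int) : List String :=
  let firsts := pvFirsts (pvPhrases beat_chords phrase_len)
  firsts.map (fun f => pvChr (65 + (pvCountPrevFirsts firsts f : Int)))

-- ===== PRECONDITION & SPEC =====
-- Pre_ excludes only phrase_len = 0, on which Python's range(0, n, 0) raises ValueError (in A and in B alike).
def Pre_infer_form_from_chords_py (beat_chords : List String) (phrase_len : Int) : Prop := phrase_len ≠ 0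
instance (beat_chords : List String) (phrase_len : Int) : Decidable (Pre_infer_form_from_chords_py beat_chords phrase_len) := by unfold Pre_infer_form_from_chords_py; infer_instance

def pvWitness_infer_form_from_chords_py : List String × Int := (["C", "G", "Am", "F", "C", "G"], 2)

def Spec_infer_form_from_chords_py (beat_chords : List String) (phrase_len : Int) (out : List String) : Prop := out = infer_form_from_chords_py_alt beat_chords phrase_len
instance (beat_chords : List String) (phrase_len : Int) (out : List String) : Decidable (Spec_infer_form_from_chords_py beat_chords phrase_len out) := by unfold Spec_infer_form_from_chords_py; infer_instance

-- ===== CLAIM (what is proved, stated in full; the proofs are below) =====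
def Claim_equal_infer_form_from_chords_py : Prop := ∀ (beat_chords : List String) (phrase_len : Int), Dom_infer_form_from_chords_py beat_chords phrase_len → Pre_infer_form_from_chords_py beat_chords phrase_len → Spec_infer_form_from_chords_py beat_chords phrase_len (infer_form_from_chords_py beat_chords phrase_len)

-- ===== LEMMAS AND PROOFS =====

-- PySem.Set.update only appends to its first argument
lemma pv_update_exists_append {α : Type} [BEq α] [LawfulBEq α] (s : PySem.Set α) (l : List α) :
    ∃ t, PySem.Set.update s l = s ++ t := by
  induction l generalizing s with
  | nil => exact ⟨[], by simp [PySem.Set.update]⟩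
  | cons x l ih =>
    show ∃ t, PySem.Set.update (PySem.Set.add s x) l = s ++ t
    by_cases hx : x ∈ s
    · rw [PySem.Set.add_of_mem hx]; exact ih s
    · rw [PySem.Set.add_of_not_mem hx]
      obtain ⟨t, ht⟩ := ih (s ++ [x])
      exact ⟨[x] ++ t, by simpa [List.append_assoc] using ht⟩

lemma pv_index?_update_of_mem {α : Type} [BEq α] [LawfulBEq α] (s : PySem.Set α) (l : List α)
    (p : α) (hp : p ∈ s) :
    PySem.List.index? (PySem.Set.update s l) p = PySem.List.index? s p := by
  obtain ⟨t, ht⟩ := pv_update_exists_append s l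
  rw [ht, PySem.List.index?_append_of_mem t hp]

-- loop invariant for A's labeling fold: if `seen` maps exactly the distinct phrases met so far
-- (listed in `us`, in order, labels base, base+1, …) and the counter is base + |us|, then the
-- remaining loop labels each phrase by its first-occurrence index in `Set.update us ps`.
lemma pv_labelLoop_inv (ps us : List (List String)) (seen : PySem.Dict (List String) String)
    (base : Int) (acc : List String)
    (hseen : ∀ q, seen.get? q = (PySem.List.index? us q).map (fun k => pvChr (base + k))) :
    (ps.foldl pvLabelStep (acc, seen, base + us.length)).1
      = acc ++ ps.map (fun p =>
          pvChr (base + ((PySem.List.index? (PySem.Set.update us ps) p).getD 0 : Nat))) := by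
  induction ps generalizing us seen acc with
  | nil => simp
  | cons p rest ih =>
    have hupd : PySem.Set.update us (p :: rest) = PySem.Set.update (PySem.Set.add us p) rest := rfl
    cases h : seen.get? p with
    | some v =>
      have hidx : ∃ k, PySem.List.index? us p = some k ∧ v = pvChr (base + k) := by
        rcases ho : PySem.List.index? us p with _ | k
        · rw [hseen p, ho] at h; simp at h
        · rw [hseen p, ho] at h; simp at h; exact ⟨k, rfl, h.symm⟩
      obtain ⟨k, hk, hv⟩ := hidx
      have hpmem : p ∈ us := (PySem.List.index?_isSome_iff us p).mp (by rw [hk]; rfl)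
      have hstep : pvLabelStep (acc, seen, base + (us.length : Int)) p
          = (acc ++ [v], seen, base + us.length) := by
        simp [pvLabelStep, h]
      rw [List.foldl_cons, hstep, ih us seen (acc ++ [v]) hseen, hupd,
        PySem.Set.add_of_mem hpmem, List.map_cons]
      have hhead : pvChr (base + ((PySem.List.index? (PySem.Set.update us rest) p).getD 0 : Nat)) = v := by
        rw [pv_index?_update_of_mem us rest p hpmem, hk, hv]; rfl
      rw [hhead]
      simp
    | none =>
      have hpnot : p ∉ us := by
        intro hmem
        rcases ho : PySem.List.index? us p with _ | k
        · have := (PySem.List.index?_isSome_iff us p).mpr hmem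
          rw [ho] at this; simp at this
        · rw [hseen p, ho] at h; simp at h
      set c := pvChr (base + (us.length : Int)) with hc
      have hstep : pvLabelStep (acc, seen, base + (us.length : Int)) p
          = (acc ++ [c], seen.insert p c, base + us.length + 1) := by
        simp [pvLabelStep, h, hc]
      have hseen' : ∀ q, (seen.insert p c).get? q
          = (PySem.List.index? (us ++ [p]) q).map (fun k => pvChr (base + k)) := by
        intro q
        by_cases hq : q = p
        · rw [hq, PySem.Dict.get?_insert_self, PySem.List.index?_append_singleton_self us p hpnot]
          simp [hc]
        · rw [PySem.Dict.get?_insert_of_ne seen c hq, hseen q]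
          by_cases hqm : q ∈ us
          · rw [PySem.List.index?_append_of_mem [p] hqm]
          · rw [(PySem.List.index?_eq_none_iff us q).mpr hqm,
              (PySem.List.index?_eq_none_iff (us ++ [p]) q).mpr (by simp [hqm, hq])]
      have hlen : base + (us.length : Int) + 1 = base + ((us ++ [p]).length : Int) := by
        simp; omega
      rw [List.foldl_cons, hstep, hlen, ih (us ++ [p]) (seen.insert p c) (acc ++ [c]) hseen',
        hupd, PySem.Set.add_of_not_mem hpnot, List.map_cons]
      have hpm : p ∈ us ++ [p] := by simp
      have hhead : pvChr (base + ((PySem.List.index? (PySem.Set.update (us ++ [p]) rest) p).getD 0 : Nat)) = c := by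
        rw [pv_index?_update_of_mem (us ++ [p]) rest p hpm,
          PySem.List.index?_append_singleton_self us p hpnot]
        rfl
      rw [hhead]
      simp

-- A computes the first-occurrence-index labeling of the phrase list
lemma pv_A_eq (beat_chords : List String) (phrase_len : Int) :
    infer_form_from_chords_py beat_chords phrase_len
      = (pvPhrases beat_chords phrase_len).map (fun p =>
          pvChr (65 + ((PySem.List.index? (PySem.List.dedup (pvPhrases beat_chords phrase_len)) p).getD 0 : Nat))) := by
  unfold infer_form_from_chords_py
  rw [show (fun (st : List String × PySem.Dict (List String) String × Int) i =>
        pvLabelStep st (PySem.List.slice beat_chords (some i) (some (i + phrase_len))))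
      = (fun st i => pvLabelStep st ((fun i => PySem.List.slice beat_chords (some i) (some (i + phrase_len))) i)) from rfl,
    ← List.foldl_map]
  have h0 : (65 : Int) = 65 + (([] : List (List String)).length : Int) := by simp
  rw [show ((PySem.List.pyRange 0 (PySem.List.len beat_chords) phrase_len).map
        (fun i => PySem.List.slice beat_chords (some i) (some (i + phrase_len))))
      = pvPhrases beat_chords phrase_len from rfl, h0,
    pv_labelLoop_inv (pvPhrases beat_chords phrase_len) [] PySem.Dict.empty 65 []
      (by intro q; simp [PySem.Dict.get?_empty, PySem.List.index?_eq_idxOf?])]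
  simp [PySem.Set.update, PySem.List.dedup_eq_ofList, PySem.Set.ofList_eq_foldl]

-- a position f is labeled a first occurrence exactly when its element is new
lemma pv_first_iff (ps : List (List String)) (f : Nat) (hf : f < ps.length) :
    PySem.List.index? ps ps[f] = some f ↔ ps[f] ∉ ps.take f := by
  constructor
  · intro h hmem
    obtain ⟨j, hj, hje⟩ := List.mem_take_iff_getElem.mp hmem
    obtain ⟨_, _, hmin⟩ := PySem.List.getElem_of_index?_eq_some h
    exact hmin j (lt_of_lt_of_le hj (by omega)) hje
  · intro hnot
    rcases ho : PySem.List.index? ps ps[f] with _ | k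
    · exact absurd ((PySem.List.index?_eq_none_iff ps ps[f]).mp ho) (by simp [List.getElem_mem])
    · obtain ⟨hk, hke, hmin⟩ := PySem.List.getElem_of_index?_eq_some ho
      rcases lt_trichotomy k f with h1 | h1 | h1
      · exact absurd (List.mem_take_iff_getElem.mpr ⟨k, by omega, hke⟩) hnot
      · rw [h1]
      · exact absurd rfl (hmin f h1)

-- |dedup (ps.take f)| counts the first-occurrence positions below f
lemma pv_dedup_take_len (ps : List (List String)) (f : Nat) (hf : f ≤ ps.length) :
    (PySem.List.dedup (ps.take f)).length
      = (List.range f).countP (fun i => decide (PySem.List.index? ps (ps.getD i []) = some i)) := by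
  induction f with
  | zero => simp [PySem.List.dedup_eq_ofList, PySem.Set.ofList]
  | succ f ih =>
    have hf' : f < ps.length := by omega
    have htake : ps.take (f + 1) = ps.take f ++ [ps[f]] := by
      rw [List.take_add_one, List.getElem?_eq_getElem hf']; rfl
    have hsnoc : PySem.List.dedup (ps.take (f + 1))
        = PySem.Set.add (PySem.List.dedup (ps.take f)) ps[f] := by
      simp only [PySem.List.dedup_eq_ofList, PySem.Set.ofList_eq_foldl, htake, List.foldl_append,
        List.foldl_cons, List.foldl_nil]
    rw [hsnoc, List.range_succ, List.countP_append]
    have hgd : ps.getD f [] = ps[f] := List.getD_eq_getElem ps [] hf'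
    by_cases hmem : ps[f] ∈ ps.take f
    · have hm' : ps[f] ∈ PySem.List.dedup (ps.take f) := (PySem.List.mem_dedup _ _).mpr hmem
      have hc : decide (PySem.List.index? ps (ps.getD f []) = some f) = false := by
        rw [hgd]
        exact decide_eq_false (fun h => ((pv_first_iff ps f hf').mp h) hmem)
      rw [PySem.Set.add_of_mem hm', ih (by omega), List.countP_cons, List.countP_nil, hc]
      simp
    · have hm' : ps[f] ∉ PySem.List.dedup (ps.take f) := fun h => hmem ((PySem.List.mem_dedup _ _).mp h)
      have hc : decide (PySem.List.index? ps (ps.getD f []) = some f) = true := by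
        rw [hgd]
        exact decide_eq_true ((pv_first_iff ps f hf').mpr hmem)
      rw [PySem.Set.add_of_not_mem hm', List.length_append, ih (by omega),
        List.countP_cons, List.countP_nil, hc]
      simp

-- the position of p in dedup ps is |dedup (ps.take f)| where f is p's first occurrence
lemma pv_index_dedup (ps : List (List String)) (p : List String) (f : Nat)
    (h : PySem.List.index? ps p = some f) :
    PySem.List.index? (PySem.List.dedup ps) p = some (PySem.List.dedup (ps.take f)).length := by
  obtain ⟨pre, suf, hps, hlen, hpre⟩ := (PySem.List.index?_eq_some_iff ps p f).mp h
  have hpnot : p ∉ PySem.List.dedup pre := fun hm => hpre ((PySem.List.mem_dedup _ _).mp hm)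
  have htake : ps.take f = pre := by rw [hps, ← hlen, List.take_left]
  have hdec : PySem.List.dedup ps
      = PySem.Set.update (PySem.List.dedup pre ++ [p]) suf := by
    rw [hps]
    simp only [PySem.List.dedup_eq_ofList, PySem.Set.ofList_eq_foldl, List.foldl_append,
      List.foldl_cons]
    rw [show (pre.foldl PySem.Set.add []).add p = PySem.Set.add (PySem.List.dedup pre) p from by
        simp [PySem.List.dedup_eq_ofList, PySem.Set.ofList_eq_foldl],
      PySem.Set.add_of_not_mem hpnot]
    rfl
  rw [hdec, pv_index?_update_of_mem _ suf p (by simp),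
    PySem.List.index?_append_singleton_self _ p hpnot, htake]

-- the indicator fold is a countP
lemma pv_foldl_indicator (l : List Nat) (fs : List Nat) (acc : Nat) :
    l.foldl (fun acc i => acc + (if fs.getD i 0 = i then 1 else 0)) acc
      = acc + l.countP (fun i => decide (fs.getD i 0 = i)) := by
  induction l generalizing acc with
  | nil => simp
  | cons x l ih =>
    rw [List.foldl_cons, ih, List.countP_cons]
    by_cases h : fs.getD x 0 = x <;> simp [h] <;> omega

-- B's inner sum counts first occurrences below f
lemma pv_count_eq (ps : List (List String)) (f : Nat) (hf : f ≤ ps.length) :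
    pvCountPrevFirsts (pvFirsts ps) f
      = (List.range f).countP (fun i => decide (PySem.List.index? ps (ps.getD i []) = some i)) := by
  unfold pvCountPrevFirsts
  rw [pv_foldl_indicator, Nat.zero_add]
  apply List.countP_congr
  intro i hi
  have hif : i < f := List.mem_range.mp hi
  have hil : i < ps.length := by omega
  have hfl : (pvFirsts ps).getD i 0 = (PySem.List.index? ps ps[i]).getD 0 := by
    have : i < (pvFirsts ps).length := by simp [pvFirsts]; omega
    rw [List.getD_eq_getElem _ _ this]
    simp [pvFirsts]
  have hgd : ps.getD i [] = ps[i] := List.getD_eq_getElem ps [] hil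
  rcases ho : PySem.List.index? ps ps[i] with _ | k
  · exact absurd ((PySem.List.index?_eq_none_iff ps ps[i]).mp ho) (by simp [List.getElem_mem])
  · obtain ⟨_, _, hmin⟩ := PySem.List.getElem_of_index?_eq_some ho
    have hki : k ≤ i := by
      by_contra hk
      exact hmin i (by omega) rfl
    rw [hfl, ho, hgd, ho]
    simp only [Option.getD_some]
    constructor
    · intro h; simp_all
    · intro h; simp_all

-- B computes the same first-occurrence-index labeling
lemma pv_B_eq (beat_chords : List String) (phrase_len : Int) :
    infer_form_from_chords_py_alt beat_chords phrase_len
      = (pvPhrases beat_chords phrase_len).map (fun p =>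
          pvChr (65 + ((PySem.List.index? (PySem.List.dedup (pvPhrases beat_chords phrase_len)) p).getD 0 : Nat))) := by
  unfold infer_form_from_chords_py_alt
  set ps := pvPhrases beat_chords phrase_len with hps
  show (pvFirsts ps).map _ = _
  rw [pvFirsts, List.map_map]
  apply List.map_congr_left
  intro p hp
  rcases ho : PySem.List.index? ps p with _ | f
  · exact absurd ((PySem.List.index?_eq_none_iff ps p).mp ho) (by simp [hp])
  · obtain ⟨hfl, _, _⟩ := PySem.List.getElem_of_index?_eq_some ho
    simp only [Function.comp_apply, ho, Option.getD_some]
    rw [show (List.map (fun p => (PySem.List.index? ps p).getD 0) ps) = pvFirsts ps from rfl,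
      pv_count_eq ps f (by omega), ← pv_dedup_take_len ps f (by omega),
      pv_index_dedup ps p f ho]
    simp

-- ===== VERDICT (by name: the statement is the Claim_ definition above) =====
theorem infer_form_from_chords_py_spec : Claim_equal_infer_form_from_chords_py := by
  intro beat_chords phrase_len _ _
  unfold Spec_infer_form_from_chords_py
  rw [pv_A_eq, pv_B_eq]
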